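-- pv_equiv track=rewrite | github.com/dg720/MultiConAD | processing/phase2/extract_features.py | shallow_chunks
-- ===== SOURCE A (Python) =====
-- def shallow_chunks(upos_sequence: list[str]) -> list[tuple[str, int]]:
--     chunks: list[tuple[str, int]] = []
--     idx = 0
--     while idx < len(upos_sequence):
--         pos = upos_sequence[idx]
--         if pos in {"DET", "ADJ", "NUM", "NOUN", "PROPN", "PRON"}:
--             start = idx
--             seen_nominal = False
--             while idx < len(upos_sequence) and upos_sequence[idx] in {"DET", "ADJ", "NUM", "NOUN", "PROPN", "PRON"}:
--                 if upos_sequence[idx] in {"NOUN", "PROPN", "PRON"}: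
--                     seen_nominal = True
--                 idx += 1
--             if seen_nominal:
--                 chunks.append(("NP", idx - start))
--                 continue
--             idx = start
--         if pos in {"AUX", "VERB", "ADV", "PART"}:
--             start = idx
--             seen_verb = False
--             while idx < len(upos_sequence) and upos_sequence[idx] in {"AUX", "VERB", "ADV", "PART"}:
--                 if upos_sequence[idx] == "VERB":
--                     seen_verb = True
--                 idx += 1
--             if seen_verb:
--                 chunks.append(("VP", idx - start))
--                 continue
--             idx = start
--         if pos == "ADP":
--             start = idx
--             idx += 1
--             while idx < len(upos_sequence) and upos_sequence[idx] in {"DET", "ADJ", "NUM", "NOUN", "PROPN", "PRON"}: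
--                 idx += 1
--             chunks.append(("PP", idx - start))
--             continue
--         if pos == "ADJ":
--             start = idx
--             while idx < len(upos_sequence) and upos_sequence[idx] == "ADJ":
--                 idx += 1
--             chunks.append(("ADJP", idx - start))
--             continue
--         if pos == "ADV":
--             start = idx
--             while idx < len(upos_sequence) and upos_sequence[idx] == "ADV":
--                 idx += 1
--             chunks.append(("ADVP", idx - start))
--             continue
--         idx += 1
--     return chunks
-- ===== SOURCE B (Python) =====
-- NOM = {"DET", "ADJ", "NUM", "NOUN", "PROPN", "PRON"}
-- HEAD = {"NOUN", "PROPN", "PRON"}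
-- VGRP = {"AUX", "VERB", "ADV", "PART"}
--
--
-- def shallow_chunks(upos_sequence: list[str]) -> list[tuple[str, int]]:
--     n = len(upos_sequence)
--     # One backward pass: info[i] = (nominal-run length starting at i, run contains a
--     # head nominal, verb-run length starting at i, run contains a VERB).
--     info = []
--     nlen = vlen = 0
--     nhas = vhas = False
--     for t in reversed(upos_sequence):
--         if t in NOM:
--             nlen, nhas = nlen + 1, nhas or t in HEAD
--         else:
--             nlen, nhas = 0, False
--         if t in VGRP:
--             vlen, vhas = vlen + 1, vhas or t == "VERB"
--         else:
--             vlen, vhas = 0, False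
--         info.append((nlen, nhas, vlen, vhas))
--     info.reverse()
--
--     chunks: list[tuple[str, int]] = []
--     i = 0
--     while i < n:
--         t = upos_sequence[i]
--         nlen, nhas, vlen, vhas = info[i]
--         if t in NOM and nhas:
--             chunks.append(("NP", nlen))
--             i += nlen
--             continue
--         if t in VGRP and vhas:
--             chunks.append(("VP", vlen))
--             i += vlen
--             continue
--         if t == "ADP":
--             nl = info[i + 1][0] if i + 1 < n else 0
--             chunks.append(("PP", 1 + nl))
--             i += 1 + nl
--             continue
--         if t == "ADJ":
--             j = i
--             while j < n and upos_sequence[j] == "ADJ":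
--                 j += 1
--             chunks.append(("ADJP", j - i))
--             i = j
--             continue
--         if t == "ADV":
--             j = i
--             while j < n and upos_sequence[j] == "ADV":
--                 j += 1
--             chunks.append(("ADVP", j - i))
--             i = j
--             continue
--         i += 1
--     return chunks
-- ===== Notes on version B (the rewrite author's own statement) =====
-- stated objective: alternative
-- what changed: Replaces A's rescan-and-reset nested while loops with a single backward pass that precomputes, for every position, the nominal/verb run length and whether the run contains a head nominal/VERB, so the forward pass never rescans or resets (quadratic rescanning only arises on tag-run-dense inputs, so no speed-up was measured on the generated inputs).
import Mathlib
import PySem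

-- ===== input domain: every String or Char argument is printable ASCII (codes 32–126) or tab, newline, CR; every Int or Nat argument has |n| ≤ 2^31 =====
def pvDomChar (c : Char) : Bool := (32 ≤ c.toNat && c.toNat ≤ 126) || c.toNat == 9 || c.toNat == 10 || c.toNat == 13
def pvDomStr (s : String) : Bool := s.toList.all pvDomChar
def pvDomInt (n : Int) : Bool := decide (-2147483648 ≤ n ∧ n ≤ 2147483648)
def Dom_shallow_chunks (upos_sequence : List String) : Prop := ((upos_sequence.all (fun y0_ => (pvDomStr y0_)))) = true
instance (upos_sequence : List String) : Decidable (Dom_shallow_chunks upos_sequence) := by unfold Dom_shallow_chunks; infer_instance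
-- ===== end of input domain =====

-- B precomputes per-position run lengths/flags in one backward pass, replacing A's
-- rescan-and-reset nested loops; the return value is proved equal.
-- (The fuel parameter of each outer loop is only a totality artifact: the loop index
-- strictly increases every iteration, so xs.length + 1 iterations always suffice.)

-- shared tag-set vocabulary (the Python set literals)
def isNomTag (s : String) : Bool :=
  s == "DET" || s == "ADJ" || s == "NUM" || s == "NOUN" || s == "PROPN" || s == "PRON"
def isHeadTag (s : String) : Bool := s == "NOUN" || s == "PROPN" || s == "PRON"
def isVGrpTag (s : String) : Bool := s == "AUX" || s == "VERB" || s == "ADV" || s == "PART"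

-- ===== PORT A =====

-- A's flagged inner while loop: scan while p holds, or-ing q into seen; returns (idx, seen)
-- (fuel is a totality artifact; xs.length + 1 steps always suffice)
def scanA (xs : List String) (p q : String → Bool) : Nat → Nat → Bool → Nat × Bool
  | 0, idx, seen => (idx, seen)
  | fuel + 1, idx, seen =>
    if idx < xs.length ∧ p (xs.getD idx "") then
      scanA xs p q fuel (idx + 1) (seen || q (xs.getD idx ""))
    else (idx, seen)

-- A's plain inner while loop: scan while p holds
def scanPlainA (xs : List String) (p : String → Bool) : Nat → Nat → Nat
  | 0, idx => idx
  | fuel + 1, idx =>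
    if idx < xs.length ∧ p (xs.getD idx "") then scanPlainA xs p fuel (idx + 1) else idx

-- A's outer while loop; each iteration is one pass of the Python body, 'continue' = recursive call
def loopA (xs : List String) : Nat → List (String × Int) → Nat → List (String × Int)
  | 0, chunks, _ => chunks
  | fuel + 1, chunks, idx =>
    if idx < xs.length then
      if isNomTag (xs.getD idx "") ∧ (scanA xs isNomTag isHeadTag (xs.length + 1) idx false).2 then
        loopA xs fuel
          (chunks ++ [("NP", ((scanA xs isNomTag isHeadTag (xs.length + 1) idx false).1 : Int) - (idx : Int))])
          (scanA xs isNomTag isHeadTag (xs.length + 1) idx false).1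
      else if isVGrpTag (xs.getD idx "") ∧
          (scanA xs isVGrpTag (fun s => s == "VERB") (xs.length + 1) idx false).2 then
        loopA xs fuel
          (chunks ++ [("VP", ((scanA xs isVGrpTag (fun s => s == "VERB") (xs.length + 1) idx false).1 : Int) - (idx : Int))])
          (scanA xs isVGrpTag (fun s => s == "VERB") (xs.length + 1) idx false).1
      else if xs.getD idx "" == "ADP" then
        loopA xs fuel
          (chunks ++ [("PP", (scanPlainA xs isNomTag (xs.length + 1) (idx + 1) : Int) - (idx : Int))])
          (scanPlainA xs isNomTag (xs.length + 1) (idx + 1))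
      else if xs.getD idx "" == "ADJ" then
        loopA xs fuel
          (chunks ++ [("ADJP", (scanPlainA xs (fun s => s == "ADJ") (xs.length + 1) idx : Int) - (idx : Int))])
          (scanPlainA xs (fun s => s == "ADJ") (xs.length + 1) idx)
      else if xs.getD idx "" == "ADV" then
        loopA xs fuel
          (chunks ++ [("ADVP", (scanPlainA xs (fun s => s == "ADV") (xs.length + 1) idx : Int) - (idx : Int))])
          (scanPlainA xs (fun s => s == "ADV") (xs.length + 1) idx)
      else loopA xs fuel chunks (idx + 1)
    else chunks

def shallow_chunks (upos_sequence : List String) : List (String × Int) :=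
  loopA upos_sequence (upos_sequence.length + 1) [] 0

-- ===== PORT B =====

-- B's backward pass (reversed iteration + append + reverse ⇒ right fold):
-- info[i] = (nominal run length at i, run has head nominal, verb run length at i, run has VERB)
def buildInfo : List String → List (Nat × Bool × Nat × Bool)
  | [] => []
  | t :: rest =>
    let r := buildInfo rest
    let prev := r.headD (0, false, 0, false)
    let nomPart : Nat × Bool :=
      if isNomTag t then (prev.1 + 1, prev.2.1 || isHeadTag t) else (0, false)
    let vPart : Nat × Bool :=
      if isVGrpTag t then (prev.2.2.1 + 1, prev.2.2.2 || (t == "VERB")) else (0, false)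
    (nomPart.1, nomPart.2, vPart.1, vPart.2) :: r

-- B's inner while loop for ADJ/ADV runs (fuel is a totality artifact)
def runToB (xs : List String) (p : String → Bool) : Nat → Nat → Nat
  | 0, j => j
  | fuel + 1, j =>
    if j < xs.length ∧ p (xs.getD j "") then runToB xs p fuel (j + 1) else j

-- B's forward pass over the precomputed table
def loopB (xs : List String) (info : List (Nat × Bool × Nat × Bool)) :
    Nat → List (String × Int) → Nat → List (String × Int)
  | 0, chunks, _ => chunks
  | fuel + 1, chunks, i =>
    if i < xs.length then
      if isNomTag (xs.getD i "") ∧ (info.getD i (0, false, 0, false)).2.1 then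
        loopB xs info fuel
          (chunks ++ [("NP", ((info.getD i (0, false, 0, false)).1 : Int))])
          (i + (info.getD i (0, false, 0, false)).1)
      else if isVGrpTag (xs.getD i "") ∧ (info.getD i (0, false, 0, false)).2.2.2 then
        loopB xs info fuel
          (chunks ++ [("VP", ((info.getD i (0, false, 0, false)).2.2.1 : Int))])
          (i + (info.getD i (0, false, 0, false)).2.2.1)
      else if xs.getD i "" == "ADP" then
        loopB xs info fuel
          (chunks ++ [("PP", ((1 + (if i + 1 < xs.length then (info.getD (i + 1) (0, false, 0, false)).1 else 0) : Nat) : Int))])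
          (i + 1 + (if i + 1 < xs.length then (info.getD (i + 1) (0, false, 0, false)).1 else 0))
      else if xs.getD i "" == "ADJ" then
        loopB xs info fuel
          (chunks ++ [("ADJP", (runToB xs (fun s => s == "ADJ") (xs.length + 1) i : Int) - (i : Int))])
          (runToB xs (fun s => s == "ADJ") (xs.length + 1) i)
      else if xs.getD i "" == "ADV" then
        loopB xs info fuel
          (chunks ++ [("ADVP", (runToB xs (fun s => s == "ADV") (xs.length + 1) i : Int) - (i : Int))])
          (runToB xs (fun s => s == "ADV") (xs.length + 1) i)
      else loopB xs info fuel chunks (i + 1)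
    else chunks

def shallow_chunks_alt (upos_sequence : List String) : List (String × Int) :=
  loopB upos_sequence (buildInfo upos_sequence) (upos_sequence.length + 1) [] 0

-- ===== PRECONDITION & SPEC =====
def Spec_shallow_chunks (upos_sequence : List String) (out : List (String × Int)) : Prop := out = shallow_chunks_alt upos_sequence
instance (upos_sequence : List String) (out : List (String × Int)) : Decidable (Spec_shallow_chunks upos_sequence out) := by unfold Spec_shallow_chunks; infer_instance

-- ===== CLAIM (what is proved, stated in full; the proofs are below) =====
def Claim_equal_shallow_chunks : Prop := ∀ (upos_sequence : List String), Dom_shallow_chunks upos_sequence → Spec_shallow_chunks upos_sequence (shallow_chunks upos_sequence)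

-- ===== LEMMAS AND PROOFS =====

-- headD as getD 0
theorem headD_eq_getD0 {α : Type} (l : List α) (d : α) : l.headD d = l.getD 0 d := by
  cases l <;> rfl

theorem buildInfo_length (xs : List String) : (buildInfo xs).length = xs.length := by
  induction xs with
  | nil => rfl
  | cons t rest ih => simp [buildInfo, ih]

-- one-step recurrence for the precomputed table
theorem buildInfo_getD (xs : List String) (i : Nat) (hi : i < xs.length) :
    (buildInfo xs).getD i (0, false, 0, false) =
      ((if isNomTag (xs.getD i "") then
          (((buildInfo xs).getD (i + 1) (0, false, 0, false)).1 + 1,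
           ((buildInfo xs).getD (i + 1) (0, false, 0, false)).2.1 || isHeadTag (xs.getD i ""))
        else (0, false)).1,
       (if isNomTag (xs.getD i "") then
          (((buildInfo xs).getD (i + 1) (0, false, 0, false)).1 + 1,
           ((buildInfo xs).getD (i + 1) (0, false, 0, false)).2.1 || isHeadTag (xs.getD i ""))
        else (0, false)).2,
       (if isVGrpTag (xs.getD i "") then
          (((buildInfo xs).getD (i + 1) (0, false, 0, false)).2.2.1 + 1,
           ((buildInfo xs).getD (i + 1) (0, false, 0, false)).2.2.2 || (xs.getD i "" == "VERB"))
        else (0, false)).1,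
       (if isVGrpTag (xs.getD i "") then
          (((buildInfo xs).getD (i + 1) (0, false, 0, false)).2.2.1 + 1,
           ((buildInfo xs).getD (i + 1) (0, false, 0, false)).2.2.2 || (xs.getD i "" == "VERB"))
        else (0, false)).2) := by
  induction xs generalizing i with
  | nil => simp at hi
  | cons t rest ih =>
    cases i with
    | zero =>
      simp only [buildInfo, List.getD_cons_zero, List.getD_cons_succ]
      rw [headD_eq_getD0]
    | succ j =>
      simp only [buildInfo, List.getD_cons_succ]
      exact ih j (by simpa using hi)

-- out-of-range table lookup is the default
theorem buildInfo_getD_oob (xs : List String) (i : Nat) (hi : xs.length ≤ i) :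
    (buildInfo xs).getD i (0, false, 0, false) = (0, false, 0, false) :=
  List.getD_eq_default _ _ (by rw [buildInfo_length]; exact hi)

-- A's nominal scan computes exactly the table's nominal projection
theorem scanA_nom (xs : List String) (fuel : Nat) :
    ∀ (i : Nat) (s : Bool), xs.length ≤ i + fuel →
      scanA xs isNomTag isHeadTag fuel i s =
        (i + ((buildInfo xs).getD i (0, false, 0, false)).1,
         s || ((buildInfo xs).getD i (0, false, 0, false)).2.1) := by
  induction fuel with
  | zero =>
    intro i s hf
    rw [buildInfo_getD_oob xs i (by omega)]
    simp [scanA]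
  | succ fuel ih =>
    intro i s hf
    by_cases hi : i < xs.length
    · rw [buildInfo_getD xs i hi]
      by_cases hp : isNomTag (xs.getD i "") = true
      · rw [scanA, if_pos ⟨hi, hp⟩, ih (i + 1) (s || isHeadTag (xs.getD i "")) (by omega)]
        simp only [hp, if_true]
        refine Prod.ext (by dsimp only; omega) ?_
        dsimp only
        simp [Bool.or_assoc, Bool.or_comm]
      · rw [scanA, if_neg (fun h => hp h.2)]
        simp only [hp]
        simp
    · rw [scanA, if_neg (by omega), buildInfo_getD_oob xs i (by omega)]
      simp

-- A's verb scan computes exactly the table's verb projection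
theorem scanA_v (xs : List String) (fuel : Nat) :
    ∀ (i : Nat) (s : Bool), xs.length ≤ i + fuel →
      scanA xs isVGrpTag (fun t => t == "VERB") fuel i s =
        (i + ((buildInfo xs).getD i (0, false, 0, false)).2.2.1,
         s || ((buildInfo xs).getD i (0, false, 0, false)).2.2.2) := by
  induction fuel with
  | zero =>
    intro i s hf
    rw [buildInfo_getD_oob xs i (by omega)]
    simp [scanA]
  | succ fuel ih =>
    intro i s hf
    by_cases hi : i < xs.length
    · rw [buildInfo_getD xs i hi]
      by_cases hp : isVGrpTag (xs.getD i "") = true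
      · rw [scanA, if_pos ⟨hi, hp⟩, ih (i + 1) (s || (xs.getD i "" == "VERB")) (by omega)]
        simp only [hp, if_true]
        refine Prod.ext (by dsimp only; omega) ?_
        dsimp only
        simp [Bool.or_assoc, Bool.or_comm]
      · rw [scanA, if_neg (fun h => hp h.2)]
        simp only [hp]
        simp
    · rw [scanA, if_neg (by omega), buildInfo_getD_oob xs i (by omega)]
      simp

-- A's plain scan is the first component of the flagged scan
theorem scanPlainA_eq_fst (xs : List String) (p q : String → Bool) (fuel : Nat) :
    ∀ (i : Nat) (s : Bool), scanPlainA xs p fuel i = (scanA xs p q fuel i s).1 := by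
  induction fuel with
  | zero => intro i s; rfl
  | succ fuel ih =>
    intro i s
    by_cases h : i < xs.length ∧ p (xs.getD i "") = true
    · rw [scanPlainA, if_pos h, scanA, if_pos h]
      exact ih (i + 1) (s || q (xs.getD i ""))
    · rw [scanPlainA, if_neg h, scanA, if_neg h]

-- A's ADP nominal scan through the table
theorem scanPlainA_nom (xs : List String) (fuel i : Nat) (hf : xs.length ≤ i + fuel) :
    scanPlainA xs isNomTag fuel i = i + ((buildInfo xs).getD i (0, false, 0, false)).1 := by
  rw [scanPlainA_eq_fst xs isNomTag isHeadTag fuel i false, scanA_nom xs fuel i false hf]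

-- B's run scan equals A's plain scan (same loop)
theorem runToB_eq_scanPlainA (xs : List String) (p : String → Bool) (fuel : Nat) :
    ∀ (j : Nat), runToB xs p fuel j = scanPlainA xs p fuel j := by
  induction fuel with
  | zero => intro j; rfl
  | succ fuel ih =>
    intro j
    by_cases h : j < xs.length ∧ p (xs.getD j "") = true
    · rw [runToB, if_pos h, scanPlainA, if_pos h, ih]
    · rw [runToB, if_neg h, scanPlainA, if_neg h]

theorem loopA_eq_loopB (xs : List String) (fuel : Nat) :
    ∀ (chunks : List (String × Int)) (idx : Nat),
      loopA xs fuel chunks idx = loopB xs (buildInfo xs) fuel chunks idx := by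
  induction fuel with
  | zero => intro chunks idx; rfl
  | succ n ih =>
    intro chunks idx
    rw [loopA, loopB]
    by_cases hidx : idx < xs.length
    · rw [if_pos hidx, if_pos hidx]
      simp only [scanA_nom xs (xs.length + 1) idx false (by omega),
        scanA_v xs (xs.length + 1) idx false (by omega),
        scanPlainA_nom xs (xs.length + 1) (idx + 1) (by omega),
        runToB_eq_scanPlainA, Bool.false_or]
      have hnl : (if idx + 1 < xs.length
          then ((buildInfo xs).getD (idx + 1) (0, false, 0, false)).1 else 0) =
          ((buildInfo xs).getD (idx + 1) (0, false, 0, false)).1 := by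
        split
        · rfl
        · rw [buildInfo_getD_oob xs (idx + 1) (by omega)]
      rw [hnl]
      split_ifs with h1 h2 h3 h4 h5
      · have hc : ((idx + ((buildInfo xs).getD idx (0, false, 0, false)).1 : Nat) : Int)
            - (idx : Int) = (((buildInfo xs).getD idx (0, false, 0, false)).1 : Int) := by
          push_cast; ring
        rw [hc]
        exact ih _ _
      · have hc : ((idx + ((buildInfo xs).getD idx (0, false, 0, false)).2.2.1 : Nat) : Int)
            - (idx : Int) = (((buildInfo xs).getD idx (0, false, 0, false)).2.2.1 : Int) := by
          push_cast; ring
        rw [hc]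
        exact ih _ _
      · have hc : ((idx + 1 + ((buildInfo xs).getD (idx + 1) (0, false, 0, false)).1 : Nat) : Int)
            - (idx : Int)
            = ((1 + ((buildInfo xs).getD (idx + 1) (0, false, 0, false)).1 : Nat) : Int) := by
          push_cast; ring
        rw [hc]
        exact ih _ _
      · exact ih _ _
      · exact ih _ _
      · exact ih _ _
    · rw [if_neg hidx, if_neg hidx]

-- ===== VERDICT (by name: the statement is the Claim_ definition above) =====
theorem shallow_chunks_spec : Claim_equal_shallow_chunks := by
  intro xs _
  unfold Spec_shallow_chunks shallow_chunks shallow_chunks_alt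
  exact loopA_eq_loopB xs (xs.length + 1) [] 0
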